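-- pv_equiv track=rewrite | github.com/jlevy/kmd | kmd/util/parse_shell_args.py | shell_split
-- ===== SOURCE A (Python) =====
-- from typing import Dict, Iterable, List, Tuple
--
-- def shell_split(command_str: str) -> List[str]:
--     """
--     Split a command string into tokens, respecting quotes and backslash escapes.
--     """
--     tokens = []
--     current_token = ""
--     in_quote = False
--     quote_char = ""
--     escape = False
--     i = 0
--     while i < len(command_str):
--         c = command_str[i]
--         if escape:
--             current_token += c
--             escape = False
--         elif c == "\\":
--             current_token += c
--             escape = True
--         elif in_quote:
--             current_token += c
--             if c == quote_char:
--                 in_quote = False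
--         elif c in ('"', "'"):
--             current_token += c
--             in_quote = True
--             quote_char = c
--         elif c.isspace():
--             if current_token:
--                 tokens.append(current_token)
--                 current_token = ""
--         else:
--             current_token += c
--         i += 1
--
--     if current_token:
--         tokens.append(current_token)
--
--     return tokens
-- ===== SOURCE B (Python) =====
-- def _scan_quote(q, s, k, n):
--     # index just past the quoted region that opened with q (opening quote at k-1)
--     while k < n:
--         if s[k] == "\\":
--             k = k + 2 if k + 1 < n else k + 1
--         elif s[k] == q:
--             return k + 1
--         else:
--             k += 1
--     return k
--
--
-- def shell_split(command_str):
--     s = command_str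
--     n = len(s)
--     tokens = []
--     i = 0
--     while i < n:
--         if s[i].isspace():
--             i += 1
--             continue
--         j = i
--         while j < n:
--             c = s[j]
--             if c == "\\":
--                 j = j + 2 if j + 1 < n else j + 1
--             elif c in ('"', "'"):
--                 j = _scan_quote(c, s, j + 1, n)
--             elif c.isspace():
--                 break
--             else:
--                 j += 1
--         tokens.append(s[i:j])
--         i = j
--     return tokens
-- ===== Notes on version B (the rewrite author's own statement) =====
-- stated objective: faster
-- what changed: Replaces A's per-character state machine (in_quote/escape flags with a growing accumulator string built by repeated concatenation) by region scanning: whole escape pairs and quoted regions are consumed at once by index, and each token is cut out as one slice.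
import Mathlib
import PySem

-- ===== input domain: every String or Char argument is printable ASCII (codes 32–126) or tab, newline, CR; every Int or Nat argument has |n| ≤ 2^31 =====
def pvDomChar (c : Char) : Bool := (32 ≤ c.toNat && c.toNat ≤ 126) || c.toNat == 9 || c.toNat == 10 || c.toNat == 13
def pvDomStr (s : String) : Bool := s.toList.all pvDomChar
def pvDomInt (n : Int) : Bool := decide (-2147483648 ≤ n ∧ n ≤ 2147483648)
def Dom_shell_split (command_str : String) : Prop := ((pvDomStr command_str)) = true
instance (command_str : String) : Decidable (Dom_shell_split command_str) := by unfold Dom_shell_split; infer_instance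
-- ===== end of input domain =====

-- B replaces A's per-character flag machine by index/region scanning (whole quoted
-- regions and escape pairs consumed at once, each token cut as one slice); objective:
-- faster (measured; A concatenates the token char by char).

-- ===== PORT A =====
-- A's while loop, one step per character over the same state
-- (tokens, current_token, in_quote, quote_char, escape); the accumulator is the
-- token's character list (strings are code-point lists per PySem convention).
-- Python's initial quote_char is "" and is only read while in_quote; the port
-- starts with the dummy ' '.
def loopA : List Char → List String → List Char → Bool → Char → Bool → List String
  | [], tokens, cur, _, _, _ => if cur = [] then tokens else tokens ++ [String.mk cur]
  | c :: rest, tokens, cur, inq, qc, esc =>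
    if esc then loopA rest tokens (cur ++ [c]) inq qc false
    else if c = '\\' then loopA rest tokens (cur ++ [c]) inq qc true
    else if inq then loopA rest tokens (cur ++ [c]) (if c = qc then false else true) qc false
    else if c = '"' ∨ c = '\'' then loopA rest tokens (cur ++ [c]) true c false
    else if PySem.Chars.isspace c then
      (if cur = [] then loopA rest tokens cur inq qc false
       else loopA rest (tokens ++ [String.mk cur]) [] inq qc false)
    else loopA rest tokens (cur ++ [c]) inq qc false

def shell_split (command_str : String) : List String :=
  loopA command_str.toList [] [] false ' ' false

-- ===== PORT B =====
-- Source B's _scan_quote: consume the quoted region (after the opening quote)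
-- up to and including the closing quote; returns (consumed, rest).
def scanQuote (q : Char) : List Char → List Char × List Char
  | [] => ([], [])
  | c :: rest =>
    if c = '\\' then
      match rest with
      | [] => ([c], [])
      | d :: rest' => let p := scanQuote q rest'; (c :: d :: p.1, p.2)
    else if c = q then ([c], rest)
    else let p := scanQuote q rest; (c :: p.1, p.2)

theorem scanQuote_snd_le (q : Char) : ∀ l : List Char, (scanQuote q l).2.length ≤ l.length := by
  have H : ∀ (n : Nat) (l : List Char), l.length ≤ n → (scanQuote q l).2.length ≤ l.length := by
    intro n
    induction n with
    | zero =>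
      intro l hl
      have : l = [] := List.length_eq_zero_iff.mp (Nat.le_zero.mp hl)
      subst this; simp [scanQuote]
    | succ n ih =>
      intro l hl
      match l with
      | [] => simp [scanQuote]
      | c :: rest =>
        by_cases h1 : c = '\\'
        · subst h1
          cases rest with
          | nil => simp [scanQuote]
          | cons d rest' =>
            have : (scanQuote q ('\\' :: d :: rest')).2 = (scanQuote q rest').2 := by
              rw [scanQuote.eq_def]; simp
            rw [this]
            have := ih rest' (by simp at hl; omega)
            simp; omega
        · by_cases h2 : c = q
          · subst h2; rw [scanQuote.eq_def]; simp [h1]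
          · have : (scanQuote q (c :: rest)).2 = (scanQuote q rest).2 := by
              rw [scanQuote.eq_def]; simp [h1, h2]
            rw [this]
            have := ih rest (by simp at hl; omega)
            simp; omega
  intro l; exact H l.length l le_rfl

-- Source B's inner token loop: consume one token (atoms: escape pair, lone trailing
-- backslash, quoted region, bare character) until whitespace or end.
def scanToken : List Char → List Char × List Char
  | [] => ([], [])
  | c :: rest =>
    if c = '\\' then
      match rest with
      | [] => ([c], [])
      | d :: rest' => let p := scanToken rest'; (c :: d :: p.1, p.2)
    else if c = '"' ∨ c = '\'' then
      let p1 := scanQuote c rest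
      let p := scanToken p1.2
      (c :: (p1.1 ++ p.1), p.2)
    else if PySem.Chars.isspace c then ([], c :: rest)
    else let p := scanToken rest; (c :: p.1, p.2)
termination_by l => l.length
decreasing_by
  · simp
  · have := scanQuote_snd_le c rest; simp; omega
  · simp

theorem scanToken_snd_le : ∀ l : List Char, (scanToken l).2.length ≤ l.length := by
  intro l
  induction l using scanToken.induct with
  | case1 => simp [scanToken]
  | case2 => simp [scanToken]
  | case3 d rest' ih =>
    have hS : (scanToken ('\\' :: d :: rest')).2 = (scanToken rest').2 := by
      rw [scanToken.eq_def]; simp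
    rw [hS]; simp; omega
  | case4 c rest h1 h2 p1 ih =>
    have hS : (scanToken (c :: rest)).2 = (scanToken (scanQuote c rest).2).2 := by
      rw [scanToken.eq_def]; simp [h1, h2]
    rw [hS]
    have hp1 : p1 = scanQuote c rest := rfl
    rw [hp1] at ih
    have := scanQuote_snd_le c rest
    simp; omega
  | case5 c rest h1 h2 h3 => simp [scanToken.eq_def, h1, h2, h3]
  | case6 c rest h1 h2 h3 ih =>
    have hS : (scanToken (c :: rest)).2 = (scanToken rest).2 := by
      rw [scanToken.eq_def]; simp [h1, h2, h3]
    rw [hS]; simp; omega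

theorem scanToken_snd_lt (c : Char) (rest : List Char)
    (h : ¬ PySem.Chars.isspace c = true) :
    (scanToken (c :: rest)).2.length < (c :: rest).length := by
  by_cases h1 : c = '\\'
  · subst h1
    cases rest with
    | nil => simp [scanToken]
    | cons d rest' =>
      have hS : (scanToken ('\\' :: d :: rest')).2 = (scanToken rest').2 := by
        rw [scanToken.eq_def]; simp
      rw [hS]
      have := scanToken_snd_le rest'
      simp; omega
  · by_cases h2 : c = '"' ∨ c = '\''
    · have hS : (scanToken (c :: rest)).2 = (scanToken (scanQuote c rest).2).2 := by
        rw [scanToken.eq_def]; simp [h1, h2]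
      rw [hS]
      have ha := scanToken_snd_le (scanQuote c rest).2
      have hb := scanQuote_snd_le c rest
      simp; omega
    · have hS : (scanToken (c :: rest)).2 = (scanToken rest).2 := by
        rw [scanToken.eq_def]; simp [h1, h2, h]
      rw [hS]
      have := scanToken_snd_le rest
      simp; omega

-- Source B's outer loop: skip whitespace, cut one token, repeat.
def loopB : List Char → List String
  | [] => []
  | c :: rest =>
    if h : PySem.Chars.isspace c then loopB rest
    else
      let p := scanToken (c :: rest)
      String.mk p.1 :: loopB p.2
termination_by l => l.length
decreasing_by
  · simp
  · exact scanToken_snd_lt c rest h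

def shell_split_alt (command_str : String) : List String :=
  loopB command_str.toList

-- ===== PRECONDITION & SPEC =====
def Spec_shell_split (command_str : String) (out : List String) : Prop := out = shell_split_alt command_str
instance (command_str : String) (out : List String) : Decidable (Spec_shell_split command_str out) := by unfold Spec_shell_split; infer_instance

-- ===== CLAIM (what is proved, stated in full; the proofs are below) =====
def Claim_equal_shell_split : Prop := ∀ (command_str : String), Dom_shell_split command_str → Spec_shell_split command_str (shell_split command_str)

-- ===== LEMMAS AND PROOFS =====

-- With in_quote = false the quote_char is never read until it is overwritten.
theorem loopA_qc_irrel : ∀ (l : List Char) (tokens : List String) (cur : List Char)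
    (qc qc' : Char) (esc : Bool),
    loopA l tokens cur false qc esc = loopA l tokens cur false qc' esc := by
  intro l
  induction l with
  | nil => intro tokens cur qc qc' esc; simp [loopA]
  | cons c rest ih =>
    intro tokens cur qc qc' esc
    cases esc with
    | true => simp only [loopA]; exact ih ..
    | false =>
      simp only [loopA, Bool.false_eq_true, if_false]
      split_ifs <;> first
        | exact ih ..
        | rfl

-- A's loop in the in-quote state consumes exactly B's quoted region.
theorem loopA_quote : ∀ (l : List Char) (q : Char) (tokens : List String) (cur : List Char),
    loopA l tokens cur true q false =
      loopA (scanQuote q l).2 tokens (cur ++ (scanQuote q l).1) false q false := by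
  have H : ∀ (n : Nat) (l : List Char), l.length ≤ n →
      ∀ (q : Char) (tokens : List String) (cur : List Char),
      loopA l tokens cur true q false =
        loopA (scanQuote q l).2 tokens (cur ++ (scanQuote q l).1) false q false := by
    intro n
    induction n with
    | zero =>
      intro l hl q tokens cur
      have : l = [] := List.length_eq_zero_iff.mp (Nat.le_zero.mp hl)
      subst this; simp [loopA, scanQuote]
    | succ n ih =>
      intro l hl q tokens cur
      match l with
      | [] => simp [loopA, scanQuote]
      | c :: rest =>
        by_cases h1 : c = '\\'
        · subst h1
          cases rest with
          | nil => simp [loopA, scanQuote]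
          | cons d rest' =>
            have hA : loopA ('\\' :: d :: rest') tokens cur true q false
                = loopA rest' tokens (cur ++ ['\\', d]) true q false := by
              simp [loopA]
            have hS : scanQuote q ('\\' :: d :: rest')
                = ('\\' :: d :: (scanQuote q rest').1, (scanQuote q rest').2) := by
              rw [scanQuote.eq_def]; simp
            rw [hA, hS, ih rest' (by simp at hl; omega) q tokens (cur ++ ['\\', d])]
            simp
        · by_cases h2 : c = q
          · subst h2
            have hA : loopA (c :: rest) tokens cur true c false
                = loopA rest tokens (cur ++ [c]) false c false := by
              simp [loopA, h1]
            rw [hA]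
            rw [scanQuote.eq_def]; simp [h1]
          · have hA : loopA (c :: rest) tokens cur true q false
                = loopA rest tokens (cur ++ [c]) true q false := by
              simp [loopA, h1, h2]
            have hS : scanQuote q (c :: rest)
                = (c :: (scanQuote q rest).1, (scanQuote q rest).2) := by
              rw [scanQuote.eq_def]; simp [h1, h2]
            rw [hA, hS, ih rest (by simp at hl; omega) q tokens (cur ++ [c])]
            simp
  intro l; exact H l.length l le_rfl

-- A's loop in the neutral state consumes exactly B's token scan.
theorem loopA_token : ∀ (l : List Char) (tokens : List String) (cur : List Char) (qc : Char),
    loopA l tokens cur false qc false =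
      loopA (scanToken l).2 tokens (cur ++ (scanToken l).1) false qc false := by
  intro l
  induction l using scanToken.induct with
  | case1 => intro tokens cur qc; simp [loopA, scanToken]
  | case2 => intro tokens cur qc; simp [loopA, scanToken]
  | case3 d rest' ih =>
    intro tokens cur qc
    have hA : loopA ('\\' :: d :: rest') tokens cur false qc false
        = loopA rest' tokens (cur ++ ['\\', d]) false qc false := by
      simp [loopA]
    have hS : scanToken ('\\' :: d :: rest')
        = ('\\' :: d :: (scanToken rest').1, (scanToken rest').2) := by
      rw [scanToken.eq_def]; simp
    rw [hA, hS, ih tokens (cur ++ ['\\', d]) qc]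
    simp
  | case4 c rest h1 h2 p1 ih =>
    intro tokens cur qc
    have hp1 : p1 = scanQuote c rest := rfl
    rw [hp1] at ih
    have hA : loopA (c :: rest) tokens cur false qc false
        = loopA rest tokens (cur ++ [c]) true c false := by
      rcases h2 with rfl | rfl <;> simp [loopA, h1]
    have hS : scanToken (c :: rest)
        = (c :: ((scanQuote c rest).1 ++ (scanToken (scanQuote c rest).2).1),
           (scanToken (scanQuote c rest).2).2) := by
      rw [scanToken.eq_def]; simp [h1, h2]
    rw [hA, hS, loopA_quote rest c tokens (cur ++ [c]),
        ih tokens (cur ++ [c] ++ (scanQuote c rest).1) c,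
        loopA_qc_irrel _ _ _ c qc]
    simp
  | case5 c rest h1 h2 h3 =>
    intro tokens cur qc
    rw [scanToken.eq_def]; simp [h1, h2, h3]
  | case6 c rest h1 h2 h3 ih =>
    intro tokens cur qc
    have hA : loopA (c :: rest) tokens cur false qc false
        = loopA rest tokens (cur ++ [c]) false qc false := by
      simp [loopA, h1, h2, h3]
    have hS : scanToken (c :: rest)
        = (c :: (scanToken rest).1, (scanToken rest).2) := by
      rw [scanToken.eq_def]; simp [h1, h2, h3]
    rw [hA, hS, ih tokens (cur ++ [c]) qc]
    simp

theorem scanToken_fst_cons (c : Char) (rest : List Char)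
    (h : ¬ PySem.Chars.isspace c = true) :
    ∃ t, (scanToken (c :: rest)).1 = c :: t := by
  by_cases h1 : c = '\\'
  · subst h1
    cases rest with
    | nil => exact ⟨[], by simp [scanToken]⟩
    | cons d rest' => exact ⟨d :: (scanToken rest').1, by rw [scanToken.eq_def]; simp⟩
  · by_cases h2 : c = '"' ∨ c = '\''
    · exact ⟨(scanQuote c rest).1 ++ (scanToken (scanQuote c rest).2).1, by rw [scanToken.eq_def]; simp [h1, h2]⟩
    · exact ⟨(scanToken rest).1, by rw [scanToken.eq_def]; simp [h1, h2, h]⟩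

-- The rest after a token scan is empty or starts with whitespace.
theorem scanToken_snd_space : ∀ l : List Char,
    (scanToken l).2 = [] ∨
      ∃ d r', (scanToken l).2 = d :: r' ∧ PySem.Chars.isspace d = true := by
  intro l
  induction l using scanToken.induct with
  | case1 => left; simp [scanToken]
  | case2 => left; simp [scanToken]
  | case3 d rest' ih => rw [scanToken.eq_def]; simpa using ih
  | case4 c rest h1 h2 p1 ih =>
    have hS : (scanToken (c :: rest)).2 = (scanToken (scanQuote c rest).2).2 := by
      rw [scanToken.eq_def]; simp [h1, h2]
    have hp1 : p1 = scanQuote c rest := rfl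
    rw [hp1] at ih
    rw [hS]; exact ih
  | case5 c rest h1 h2 h3 =>
    right; exact ⟨c, rest, by rw [scanToken.eq_def]; simp [h1, h2, h3], h3⟩
  | case6 c rest h1 h2 h3 ih =>
    have hS : (scanToken (c :: rest)).2 = (scanToken rest).2 := by
      rw [scanToken.eq_def]; simp [h1, h2, h3]
    rw [hS]; exact ih

theorem space_not_special (c : Char) (h : PySem.Chars.isspace c = true) :
    ¬ c = '\\' ∧ ¬ (c = '"' ∨ c = '\'') := by
  refine ⟨?_, ?_⟩
  · rintro rfl; simp [PySem.Chars.isspace] at h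
  · rintro (rfl | rfl) <;> simp [PySem.Chars.isspace] at h

theorem loopA_eq_loopB : ∀ (n : Nat) (l : List Char), l.length ≤ n →
    ∀ (tokens : List String) (qc : Char),
      loopA l tokens [] false qc false = tokens ++ loopB l := by
  intro n
  induction n with
  | zero =>
    intro l hl tokens qc
    have : l = [] := List.length_eq_zero_iff.mp (Nat.le_zero.mp hl)
    subst this; simp [loopA, loopB]
  | succ n ih =>
    intro l hl tokens qc
    match l with
    | [] => simp [loopA, loopB]
    | c :: rest =>
      by_cases hsp : PySem.Chars.isspace c = true
      · have hns := space_not_special c hsp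
        have hA : loopA (c :: rest) tokens [] false qc false
            = loopA rest tokens [] false qc false := by
          simp [loopA, hns.1, hns.2, hsp]
        rw [hA, ih rest (by simp at hl; omega) tokens qc]
        simp [loopB, hsp]
      · have hA := loopA_token (c :: rest) tokens [] qc
        simp only [List.nil_append] at hA
        obtain ⟨t, ht⟩ := scanToken_fst_cons c rest hsp
        have hB : loopB (c :: rest)
            = String.mk (scanToken (c :: rest)).1 :: loopB (scanToken (c :: rest)).2 := by
          simp [loopB, hsp]
        rcases scanToken_snd_space (c :: rest) with hr | ⟨d, r', hr, hd⟩
        · rw [hA, hr, ht]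
          simp [loopA, hB, hr, ht, loopB]
        · have hlen := scanToken_snd_lt c rest hsp
          rw [hr] at hlen
          have hr'n : r'.length ≤ n := by simp at hlen hl; omega
          have hnsd := space_not_special d hd
          have hA2 : loopA (d :: r') tokens (c :: t) false qc false
              = loopA r' (tokens ++ [String.mk (c :: t)]) [] false qc false := by
            simp [loopA, hnsd.1, hnsd.2, hd]
          rw [hA, hr, ht, hA2, ih r' hr'n (tokens ++ [String.mk (c :: t)]) qc]
          rw [hB, hr, ht]
          simp [loopB, hd]

-- ===== VERDICT (by name: the statement is the Claim_ definition above) =====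
theorem shell_split_spec : Claim_equal_shell_split := by
  intro command_str _
  unfold Spec_shell_split shell_split shell_split_alt
  simpa using loopA_eq_loopB command_str.toList.length command_str.toList le_rfl [] ' '
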